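-- pv_equiv track=rewrite | github.com/hungyen0402/lap_trinh_python | ICPC0114.py | is_perfect_prime
-- ===== SOURCE A (Python) =====
-- def is_prime(n):
--     if n <= 1:
--         return False
--     if n <= 3:
--         return True
--     if n % 2 == 0 or n % 3 == 0:
--         return False
--     i = 5
--     while i * i <= n:
--         if n % i == 0 or n % (i + 2) == 0:
--             return False
--         i += 6
--     return True
--
-- def is_perfect_prime(n):
--     # Kiểm tra N có phải số nguyên tố hay không
--     if not is_prime(n):
--         return False
--
--     # Kiểm tra từng chữ số và tổng các chữ số
--     sum_digits = 0
--     for digit in str(n):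
--         if digit not in '2357':  # Kiểm tra xem từng chữ số có phải là 2, 3, 5, 7 không
--             return False
--         sum_digits += int(digit)
--
--     # Kiểm tra tổng các chữ số có phải số nguyên tố không
--     if not is_prime(sum_digits):
--         return False
--
--     # Kiểm tra số đảo ngược có phải số nguyên tố không
--     reversed_n = int(str(n)[::-1])
--     if not is_prime(reversed_n):
--         return False
--
--     return True
-- ===== SOURCE B (Python) =====
-- def is_prime(n):
--     if n <= 1:
--         return False
--     if n <= 3:
--         return True
--     if n % 2 == 0 or n % 3 == 0:
--         return False
--     i = 5
--     while i * i <= n: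
--         if n % i == 0 or n % (i + 2) == 0:
--             return False
--         i += 6
--     return True
--
--
-- def is_perfect_prime(n):
--     if not is_prime(n):
--         return False
--     # One arithmetic pass over the digits: validity check and digit sum together,
--     # without building str(n) or converting each digit back with int().
--     m = n
--     sum_digits = 0
--     while m > 0:
--         d = m % 10
--         m //= 10
--         if d not in (2, 3, 5, 7):
--             return False
--         sum_digits += d
--     return is_prime(sum_digits) and is_prime(int(str(n)[::-1]))
-- ===== Notes on version B (the rewrite author's own statement) =====
-- stated objective: alternative
-- what changed: A's per-character string pass (membership test plus int(digit) accumulation over str(n)) is replaced by one integer-arithmetic loop that repeatedly splits off the last decimal digit, checks it is a prime digit and sums it; the reversal stays string-based.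
import Mathlib
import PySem

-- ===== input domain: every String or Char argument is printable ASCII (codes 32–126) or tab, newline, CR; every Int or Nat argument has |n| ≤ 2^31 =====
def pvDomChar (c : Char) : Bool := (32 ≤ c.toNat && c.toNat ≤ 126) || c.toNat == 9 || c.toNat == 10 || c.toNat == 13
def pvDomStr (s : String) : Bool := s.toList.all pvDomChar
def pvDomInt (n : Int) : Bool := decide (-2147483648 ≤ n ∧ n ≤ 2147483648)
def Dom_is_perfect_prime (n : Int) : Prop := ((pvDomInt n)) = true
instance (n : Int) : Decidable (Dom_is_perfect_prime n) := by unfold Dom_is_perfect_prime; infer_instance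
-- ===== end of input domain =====

-- B replaces A's string pass over str(n) (membership in '2357' + int(digit) sum) by one
-- arithmetic pass over the digits of n; the reversal stays int(str(n)[::-1]). Objective: alternative.

-- ===== PORT A =====
-- shared helper: is_prime is verbatim the same function in Source A and Source B

-- while i * i <= n: if n % i == 0 or n % (i+2) == 0: return False; i += 6
def isPrimeLoop (n i : Int) : Bool :=
  if h : i * i ≤ n then
    if PySem.Int.mod n i == 0 || PySem.Int.mod n (i + 2) == 0 then false
    else isPrimeLoop n (i + 6)
  else true
termination_by (n + 6 - i).toNat
decreasing_by
  have hii : i ≤ i * i := by nlinarith [mul_self_nonneg i]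
  omega

def is_prime (n : Int) : Bool :=
  if n ≤ 1 then false
  else if n ≤ 3 then true
  else if PySem.Int.mod n 2 == 0 || PySem.Int.mod n 3 == 0 then false
  else isPrimeLoop n 5

-- for digit in str(n): 'digit not in "2357"' (a one-char string: substring test = char membership)
-- and sum_digits += int(digit); int(digit) cannot raise in that branch (digit is one of 2/3/5/7),
-- so the port reads its parsed value with .getD 0.
def digitSumLoopA : List Char → Int → Option Int
  | [], s => some s
  | c :: cs, s =>
    if c ∈ ['2', '3', '5', '7'] then
      digitSumLoopA cs (s + (PySem.Int.ofChars? [c]).getD 0)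
    else none

def is_perfect_prime (n : Int) : Bool :=
  if !is_prime n then false
  else
    match digitSumLoopA (PySem.Int.toChars n) 0 with
    | none => false            -- 'return False' inside the for loop
    | some s =>
      if !is_prime s then false
      else
        -- reversed_n = int(str(n)[::-1]); the slice (step -1) never raises, int() cannot
        -- raise here either (all digits are 2/3/5/7), so none is an unreachable branch
        match PySem.Int.ofChars? ((PySem.List.slice? (PySem.Int.toChars n) none none (-1)).getD []) with
        | none => false
        | some r => if !is_prime r then false else true

-- ===== PORT B =====

-- while m > 0: d = m % 10; m //= 10; if d not in (2,3,5,7): return False; sum_digits += d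
def digitSumLoopB (m s : Int) : Option Int :=
  if _h : 0 < m then
    let d := PySem.Int.mod m 10
    if d = 2 ∨ d = 3 ∨ d = 5 ∨ d = 7 then digitSumLoopB (PySem.Int.floordiv m 10) (s + d)
    else none
  else some s
termination_by m.toNat
decreasing_by
  rw [PySem.Int.floordiv_eq_ediv_of_pos (by norm_num)]
  omega

def is_perfect_prime_alt (n : Int) : Bool :=
  if !is_prime n then false
  else
    match digitSumLoopB n 0 with
    | none => false            -- 'return False' inside the while loop
    | some s =>
      is_prime s &&
        (match PySem.Int.ofChars? ((PySem.List.slice? (PySem.Int.toChars n) none none (-1)).getD []) with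
         | none => false
         | some r => is_prime r)

-- ===== PRECONDITION & SPEC =====
def Spec_is_perfect_prime (n : Int) (out : Bool) : Prop := out = is_perfect_prime_alt n
instance (n : Int) (out : Bool) : Decidable (Spec_is_perfect_prime n out) := by unfold Spec_is_perfect_prime; infer_instance

-- ===== CLAIM (what is proved, stated in full; the proofs are below) =====
def Claim_equal_is_perfect_prime : Prop := ∀ (n : Int), Dom_is_perfect_prime n → Spec_is_perfect_prime n (is_perfect_prime n)

-- ===== LEMMAS AND PROOFS =====

lemma is_prime_two_le {n : Int} (h : is_prime n = true) : 2 ≤ n := by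
  unfold is_prime at h
  split_ifs at h <;> omega

lemma toDigitsCore_eq (f : Nat) : ∀ (m : Nat) (ds : List Char), m < f →
    Nat.toDigitsCore 10 f m ds =
      (if m = 0 then ['0'] else ((Nat.digits 10 m).map Nat.digitChar).reverse) ++ ds := by
  induction f with
  | zero => omega
  | succ f ih =>
    intro m ds hm
    rw [Nat.toDigitsCore]
    by_cases h0 : m / 10 = 0
    · have hm10 : m < 10 := by omega
      simp only [h0]
      by_cases hz : m = 0
      · subst hz; simp; decide
      · rw [Nat.digits_def' (by norm_num : 1 < 10) (by omega : 0 < m)]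
        simp [h0, Nat.mod_eq_of_lt hm10, hz]
    · have hrec : m / 10 < f := by
        have : m / 10 < m := Nat.div_lt_self (by omega) (by norm_num)
        omega
      simp only [h0]
      rw [ih (m / 10) _ hrec]
      have hz : ¬ m = 0 := by
        intro h; subst h; simp at h0
      rw [Nat.digits_def' (by norm_num : 1 < 10) (by omega : 0 < m)]
      simp [hz, h0]

lemma toChars_eq {n : Int} (h : 2 ≤ n) :
    PySem.Int.toChars n = ((Nat.digits 10 n.toNat).map Nat.digitChar).reverse := by
  have hn : ¬ n < 0 := by omega
  have hz : n.toNat ≠ 0 := by omega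
  simp only [PySem.Int.toChars, if_neg hn, Nat.toDigits]
  rw [toDigitsCore_eq (n.toNat + 1) n.toNat [] (by omega)]
  simp [hz]

lemma digitChar_mem_iff {d : Nat} (h : d < 10) :
    (Nat.digitChar d ∈ ['2', '3', '5', '7']) ↔ (d = 2 ∨ d = 3 ∨ d = 5 ∨ d = 7) := by
  interval_cases d <;> decide

lemma ofChars_digitChar {d : Nat} (h : d = 2 ∨ d = 3 ∨ d = 5 ∨ d = 7) :
    (PySem.Int.ofChars? [Nat.digitChar d]).getD 0 = (d : Int) := by
  rcases h with h | h | h | h <;> subst h <;> decide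

lemma digitSumLoopA_eq : ∀ (ds : List Nat) (s : Int), (∀ d ∈ ds, d < 10) →
    digitSumLoopA (ds.map Nat.digitChar) s =
      if ∀ d ∈ ds, (d = 2 ∨ d = 3 ∨ d = 5 ∨ d = 7) then some (s + (ds.sum : Int)) else none := by
  intro ds
  induction ds with
  | nil => intro s _; simp [digitSumLoopA]
  | cons d ds ih =>
    intro s hlt
    have hd10 : d < 10 := hlt d (by simp)
    simp only [List.map_cons, digitSumLoopA]
    by_cases hd : d = 2 ∨ d = 3 ∨ d = 5 ∨ d = 7
    · rw [if_pos ((digitChar_mem_iff hd10).mpr hd), ofChars_digitChar hd,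
        ih _ (fun x hx => hlt x (by simp [hx]))]
      by_cases hall : ∀ x ∈ ds, (x = 2 ∨ x = 3 ∨ x = 5 ∨ x = 7)
      · rw [if_pos hall, if_pos (by simpa [hd] using hall)]
        congr 1
        simp only [List.sum_cons]
        push_cast
        ring
      · rw [if_neg hall, if_neg (fun hc => hall (fun x hx => hc x (List.mem_cons_of_mem _ hx)))]
    · rw [if_neg (fun hc => hd ((digitChar_mem_iff hd10).mp hc)),
        if_neg (fun hc => hd (hc d (by simp)))]

lemma digitSumLoopB_eq : ∀ (k : Nat) (s : Int),
    digitSumLoopB (k : Int) s =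
      if ∀ d ∈ Nat.digits 10 k, (d = 2 ∨ d = 3 ∨ d = 5 ∨ d = 7) then
        some (s + ((Nat.digits 10 k).sum : Int))
      else none := by
  intro k
  induction k using Nat.strong_induction_on with
  | _ k ih =>
    intro s
    rw [digitSumLoopB]
    by_cases hk : 0 < k
    · rw [dif_pos (by exact_mod_cast hk)]
      have hmod : PySem.Int.mod (k : Int) 10 = ((k % 10 : Nat) : Int) := by
        exact_mod_cast PySem.Int.mod_natCast k 10
      have hdiv : PySem.Int.floordiv (k : Int) 10 = ((k / 10 : Nat) : Int) := by
        exact_mod_cast PySem.Int.floordiv_natCast k 10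
      rw [Nat.digits_def' (by norm_num : 1 < 10) hk]
      simp only [hmod, hdiv]
      by_cases hd : k % 10 = 2 ∨ k % 10 = 3 ∨ k % 10 = 5 ∨ k % 10 = 7
      · rw [if_pos (by exact_mod_cast hd), ih (k / 10) (Nat.div_lt_self hk (by norm_num))]
        by_cases hall : ∀ d ∈ Nat.digits 10 (k / 10), (d = 2 ∨ d = 3 ∨ d = 5 ∨ d = 7)
        · rw [if_pos hall, if_pos (by simpa [hd] using hall)]
          congr 1
          simp only [List.sum_cons]
          push_cast
          ring
        · rw [if_neg hall, if_neg (fun hc => hall (fun x hx => hc x (List.mem_cons_of_mem _ hx)))]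
      · rw [if_neg (by exact_mod_cast hd), if_neg (fun hc => hd (hc _ (by simp)))]
    · rw [dif_neg (by exact_mod_cast hk)]
      have : k = 0 := by omega
      subst this
      simp
lemma loops_agree {n : Int} (h : 2 ≤ n) :
    digitSumLoopA (PySem.Int.toChars n) 0 = digitSumLoopB n 0 := by
  obtain ⟨k, rfl⟩ : ∃ k : Nat, n = (k : Int) := ⟨n.toNat, by omega⟩
  have hlt : ∀ d ∈ (Nat.digits 10 (k : Int).toNat).reverse, d < 10 := by
    intro d hd
    exact Nat.digits_lt_base (by norm_num) (List.mem_reverse.mp hd)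
  rw [toChars_eq h, ← List.map_reverse, digitSumLoopA_eq _ 0 hlt, digitSumLoopB_eq]
  simp only [Int.toNat_natCast]
  by_cases hall : ∀ d ∈ Nat.digits 10 k, (d = 2 ∨ d = 3 ∨ d = 5 ∨ d = 7)
  · rw [if_pos (fun d hd => hall d (List.mem_reverse.mp hd)), if_pos hall, List.sum_reverse]
  · rw [if_neg (fun hc => hall (fun d hd => hc d (List.mem_reverse.mpr hd))),
      if_neg hall]

-- ===== VERDICT (by name: the statement is the Claim_ definition above) =====
theorem is_perfect_prime_spec : Claim_equal_is_perfect_prime := by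
  intro n _
  unfold Spec_is_perfect_prime is_perfect_prime is_perfect_prime_alt
  by_cases hp : is_prime n = true
  · rw [loops_agree (is_prime_two_le hp)]
    cases digitSumLoopB n 0 with
    | none => simp [hp]
    | some s =>
      simp only [hp, Bool.not_true, Bool.false_eq_true, if_false]
      cases hrev : PySem.Int.ofChars? ((PySem.List.slice? (PySem.Int.toChars n) none none (-1)).getD []) with
      | none => cases is_prime s <;> simp
      | some r => cases is_prime s <;> cases is_prime r <;> simp
  · have hp' : is_prime n = false := by
      cases h : is_prime n
      · rfl
      · exact absurd h hp
    simp [hp']
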